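-- pv_equiv track=rewrite | github.com/skaurl/programmers | Level 2/전화번호 목록.py | solution
-- ===== SOURCE A (Python) =====
-- def solution(phone_book):
--     phone_book = sorted(phone_book)
--     answer = True
--     i = 1
--     while True:
--         try:
--             if phone_book[0] in phone_book[i][:len(phone_book[0])]:
--                 answer = False
--                 break
--             i+=1
--             del phone_book[0]
--         except:
--             break
--     return answer
-- ===== SOURCE B (Python) =====
-- def solution(phone_book):
--     book = sorted(phone_book)
--     for a, b in zip(book, book[1:]):
--         if b.startswith(a):
--             return False
--     return True
-- ===== Notes on version B (the rewrite author's own statement) =====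
-- stated objective: simpler
-- what changed: Replaces A's while/try/except loop that deletes the front of the sorted list each step (so it effectively compares a[k] with a[2k+1]) by the standard adjacent-pair scan of the sorted list with zip(book, book[1:]).
-- intended difference: On lists whose sorted form has some a[i] that is a prefix of a[i+1] but no a[k] that is a prefix of a[2k+1] (e.g. ['a','b','bb']), A returns True although a prefix pair exists, because its front-deleting loop skips index pairs; B returns False, the intended answer for the prefix-in-phone-book problem. — e.g. on solution(["a", "b", "bb"]): A returns true, B returns false
import Mathlib
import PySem

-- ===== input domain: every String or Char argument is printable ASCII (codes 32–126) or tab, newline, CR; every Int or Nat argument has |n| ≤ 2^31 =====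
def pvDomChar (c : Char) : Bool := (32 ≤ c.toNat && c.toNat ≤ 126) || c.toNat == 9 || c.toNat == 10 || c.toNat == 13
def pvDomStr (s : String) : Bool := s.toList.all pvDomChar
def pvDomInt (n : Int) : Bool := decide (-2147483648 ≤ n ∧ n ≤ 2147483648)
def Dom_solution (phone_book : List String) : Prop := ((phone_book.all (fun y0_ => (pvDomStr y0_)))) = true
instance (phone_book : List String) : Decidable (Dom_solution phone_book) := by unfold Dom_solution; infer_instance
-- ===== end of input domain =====

-- B replaces A's while/try loop with repeated front deletions (which effectively only
-- compares a[k] with a[2k+1] of the sorted list) by the standard adjacent-pair scan of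
-- the sorted list; on the inputs D_solution describes, A wrongly returns True and B
-- returns the intended False (objective: simpler).

-- ===== PORT A =====
-- A's while-True loop: state = (remaining phone_book after the front deletions, i);
-- 'except: break' = either index probe raising IndexError, i.e. returning none.
def solutionLoopA (pb : List String) (i : Int) : Bool :=
  match pb with
  | [] => true  -- phone_book[0] raises IndexError -> except -> break
  | p0 :: rest =>
    match PySem.List.pyGet? (p0 :: rest) i with
    | none => true  -- phone_book[i] raises IndexError -> except -> break
    | some pi =>
      if PySem.Str.isIn p0 (PySem.Str.slice pi none (some (PySem.Str.len p0))) then false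
      else solutionLoopA rest (i + 1)  -- i += 1; del phone_book[0]

def solution (phone_book : List String) : Bool :=
  solutionLoopA (PySem.List.sorted phone_book (fun x => x) false) 1

-- ===== PORT B =====
-- Source B: for a, b in zip(book, book[1:]): if b.startswith(a): return False — as an .all
def solution_alt (phone_book : List String) : Bool :=
  let book := PySem.List.sorted phone_book (fun x => x) false
  (book.zip (PySem.List.slice book (some 1) none)).all
    (fun ab => !(PySem.Str.startswith ab.2 ab.1))

-- ===== PRECONDITION & SPEC =====
-- the input in sorted order, stated independently of the ports (Lean's own mergeSort)
def sortedView (pb : List String) : List String := pb.mergeSort (fun x y => decide (x ≤ y))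

-- On lists whose sorted form has some a[i] that is a prefix of a[i+1] but no a[k] that is a
-- prefix of a[2k+1] (e.g. ["a","b","bb"]), A returns True although a prefix pair exists,
-- because its front-deleting loop skips index pairs; B returns False, the intended answer.
def D_solution (phone_book : List String) : Prop :=
  (∃ i < (sortedView phone_book).length - 1,
      ((sortedView phone_book).getD i "").toList <+:
        ((sortedView phone_book).getD (i + 1) "").toList) ∧
  ¬ (∃ k < (sortedView phone_book).length / 2,
      ((sortedView phone_book).getD k "").toList <+:
        ((sortedView phone_book).getD (2 * k + 1) "").toList)
instance (phone_book : List String) : Decidable (D_solution phone_book) := by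
  unfold D_solution; infer_instance

def Spec_solution (phone_book : List String) (out : Bool) : Prop :=
  ¬ D_solution phone_book → out = solution_alt phone_book
instance (phone_book : List String) (out : Bool) : Decidable (Spec_solution phone_book out) := by
  unfold Spec_solution; infer_instance

def pvDiffWitness_solution : List String := (["a", "b", "bb"])
def pvDiffWitnessOut_solution : Bool × Bool := (true, false)

-- ===== CLAIM (what is proved, stated in full; the proofs are below) =====
def Claim_unchanged_solution : Prop := ∀ (phone_book : List String), Dom_solution phone_book → Spec_solution phone_book (solution phone_book)
def Claim_changed_solution : Prop := Dom_solution (pvDiffWitness_solution) ∧ D_solution (pvDiffWitness_solution) ∧ solution (pvDiffWitness_solution) = pvDiffWitnessOut_solution.1 ∧ solution_alt (pvDiffWitness_solution) = pvDiffWitnessOut_solution.2 ∧ pvDiffWitnessOut_solution.1 ≠ pvDiffWitnessOut_solution.2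
def Claim_exact_solution : Prop := ∀ (phone_book : List String), Dom_solution phone_book → D_solution phone_book → solution phone_book ≠ solution_alt phone_book

-- ===== LEMMAS AND PROOFS =====

-- Bool forms of D_solution's two conditions, used to connect the ports to D_solution
def hasAdjPair (a : List String) : Bool :=
  (List.range (a.length - 1)).any fun i =>
    PySem.Str.startswith (a.getD (i + 1) "") (a.getD i "")
def hasSkipPair (a : List String) : Bool :=
  (List.range (a.length / 2)).any fun k =>
    PySem.Str.startswith (a.getD (2 * k + 1) "") (a.getD k "")

-- Python's sorted = Lean's mergeSort on strings (both stable, and ≤ is antisymmetric)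
lemma msort_eq (pb : List String) :
    PySem.List.sorted pb (fun x => x) false = sortedView pb := by
  unfold sortedView
  refine PySem.List.sorted_id_eq_of_perm_of_pairwise _ _ (List.mergeSort_perm pb _) ?_
  have h := List.pairwise_mergeSort
    (le := fun x y : String => decide (x ≤ y))
    (fun a b c hab hbc => by
      simp only [decide_eq_true_eq] at *
      exact le_trans hab hbc)
    (fun a b => by
      simp only [Bool.or_eq_true, decide_eq_true_eq]
      exact le_total a b)
    pb
  exact h.imp (fun hab => by simpa using hab)

-- D_solution in terms of the Bool conditions on the Python-sorted list
lemma D_iff (pb : List String) :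
    D_solution pb ↔
      hasAdjPair (PySem.List.sorted pb (fun x => x) false) = true ∧
      hasSkipPair (PySem.List.sorted pb (fun x => x) false) = false := by
  unfold D_solution hasAdjPair hasSkipPair
  rw [msort_eq pb]
  simp only [List.any_eq_true, List.mem_range, Bool.eq_false_iff, ne_eq,
    PySem.Str.startswith_eq, PySem.Chars.startswith_iff]

-- the per-index check A's loop performs, phrased on the sorted list
def pvCheck (a : List String) (k : Nat) : Bool :=
  match a[2 * k + 1]?, a[k]? with
  | some x, some p => !(PySem.Str.startswith x p)
  | _, _ => true

-- a <:+: s.take a.length ↔ a <+: s (infix of a length-clamped slice is a prefix)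
lemma infix_take_length_iff {α : Type} (a s : List α) :
    a <:+: s.take a.length ↔ a <+: s := by
  constructor
  · intro h
    have hle : a.length ≤ (s.take a.length).length := h.sublist.length_le
    have hlen : (s.take a.length).length = a.length := by
      rw [List.length_take] at hle ⊢; omega
    have : a = s.take a.length := h.sublist.eq_of_length hlen.symm
    exact List.prefix_iff_eq_take.mpr this
  · intro h
    have : a = s.take a.length := List.prefix_iff_eq_take.mp h
    exact this ▸ List.infix_refl a

-- Python's  p0 in pi[:len(p0)]  is exactly  pi.startswith(p0)
lemma isIn_slice_eq_startswith (p0 pi : String) :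
    PySem.Str.isIn p0 (PySem.Str.slice pi none (some (PySem.Str.len p0))) =
      PySem.Str.startswith pi p0 := by
  apply Bool.eq_iff_iff.mpr
  rw [PySem.Str.isIn_iff_infix]
  simp only [PySem.Str.startswith_eq, PySem.Chars.startswith_iff,
    PySem.Str.toList_slice, PySem.Chars.slice_eq_listSlice, PySem.Str.len_eq,
    PySem.List.slice_to_natCast]
  exact infix_take_length_iff p0.toList pi.toList

-- A's loop, started after k front deletions, computes the all over indices k..n/2-1
lemma loopA_eq (a : List String) : ∀ (m k : Nat), a.length / 2 - k = m →
    solutionLoopA (a.drop k) ((k : Int) + 1) = (List.range' k m).all (pvCheck a) := by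
  intro m
  induction m with
  | zero =>
    intro k hk
    simp only [List.range'_zero, List.all_nil]
    match hd : a.drop k with
    | [] => rw [solutionLoopA]
    | p0 :: rest =>
      rw [solutionLoopA]
      have hnil : a.drop k ≠ [] := by rw [hd]; simp
      have hka : k < a.length := by
        by_contra h
        exact hnil (List.drop_eq_nil_of_le (by omega))
      have hnone : PySem.List.pyGet? (p0 :: rest) ((k : Int) + 1) = none := by
        have h1 : ((k : Int) + 1) = ((k + 1 : Nat) : Int) := by push_cast; ring
        rw [h1, PySem.List.pyGet?_natCast, List.getElem?_eq_none]
        rw [← hd, List.length_drop]; omega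
      rw [hnone]
  | succ m ih =>
    intro k hk
    have hkn : 2 * k + 1 < a.length := by omega
    have hka : k < a.length := by omega
    have hd : a.drop k = a[k] :: a.drop (k + 1) := List.drop_eq_getElem_cons hka
    rw [hd, solutionLoopA]
    have hget : PySem.List.pyGet? (a[k] :: a.drop (k + 1)) ((k : Int) + 1) =
        some a[2 * k + 1] := by
      have h1 : ((k : Int) + 1) = ((k + 1 : Nat) : Int) := by push_cast; ring
      rw [h1, PySem.List.pyGet?_natCast, ← hd, List.getElem?_drop,
        show k + (k + 1) = 2 * k + 1 from by omega]
      exact List.getElem?_eq_getElem hkn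
    simp only [hget, isIn_slice_eq_startswith]
    rw [List.range'_succ, List.all_cons]
    have hc : pvCheck a k = !(PySem.Str.startswith a[2 * k + 1] a[k]) := by
      unfold pvCheck
      simp only [List.getElem?_eq_getElem hkn, List.getElem?_eq_getElem hka]
    cases hsw : PySem.Str.startswith a[2 * k + 1] a[k] with
    | true => rw [hc, hsw]; simp
    | false =>
      simp only [hsw, Bool.false_eq_true, if_false, hc, Bool.not_false, Bool.true_and]
      have h2 : (k : Int) + 1 + 1 = ((k + 1 : Nat) : Int) + 1 := by push_cast; ring
      rw [h2]
      exact ih (k + 1) (by omega)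

-- A on the sorted list a returns the negation of the (k, 2k+1) pair test
lemma solution_eq_not_skip (pb : List String) :
    solution pb = !hasSkipPair (PySem.List.sorted pb (fun x => x) false) := by
  unfold solution
  set a := PySem.List.sorted pb (fun x => x) false with ha
  have hA := loopA_eq a (a.length / 2) 0 (by omega)
  simp only [List.drop_zero, Nat.cast_zero, zero_add] at hA
  rw [hA, ← List.range_eq_range']
  unfold hasSkipPair
  apply Bool.eq_iff_iff.mpr
  simp only [List.all_eq_true, Bool.not_eq_true', List.any_eq_false, List.mem_range]
  constructor
  · intro h k hk
    have h2 : 2 * k + 1 < a.length := by omega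
    have := h k hk
    unfold pvCheck at this
    rw [List.getElem?_eq_getElem h2, List.getElem?_eq_getElem (by omega : k < a.length)]
      at this
    rw [List.getD_eq_getElem a "" h2, List.getD_eq_getElem a "" (by omega : k < a.length)]
    simpa using this
  · intro h k hk
    have h2 : 2 * k + 1 < a.length := by omega
    have := h k hk
    rw [List.getD_eq_getElem a "" h2, List.getD_eq_getElem a "" (by omega : k < a.length)]
      at this
    unfold pvCheck
    rw [List.getElem?_eq_getElem h2, List.getElem?_eq_getElem (by omega : k < a.length)]
    simpa using this

-- zip with the tail scans adjacent pairs
lemma zip_tail_all (a : List String) (p : String × String → Bool) :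
    (a.zip a.tail).all p = true ↔
      ∀ i, (h : i + 1 < a.length) → p (a[i], a[i + 1]) = true := by
  rw [List.all_eq_true]
  constructor
  · intro h i hi
    have hlen : i < (a.zip a.tail).length := by
      simp only [List.length_zip, List.length_tail]; omega
    have := h (a.zip a.tail)[i] (List.getElem_mem hlen)
    rwa [List.getElem_zip, List.getElem_tail] at this
  · intro h x hx
    obtain ⟨i, hi, rfl⟩ := List.mem_iff_getElem.mp hx
    rw [List.getElem_zip, List.getElem_tail]
    have : i + 1 < a.length := by
      simp only [List.length_zip, List.length_tail] at hi; omega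
    exact h i this

-- B on the sorted list a returns the negation of the adjacent pair test
lemma alt_eq_not_adj (pb : List String) :
    solution_alt pb = !hasAdjPair (PySem.List.sorted pb (fun x => x) false) := by
  unfold solution_alt
  set a := PySem.List.sorted pb (fun x => x) false with ha
  simp only [PySem.List.slice_from_one]
  apply Bool.eq_iff_iff.mpr
  rw [zip_tail_all]
  unfold hasAdjPair
  simp only [Bool.not_eq_true', List.any_eq_false, List.mem_range]
  constructor
  · intro h i hi
    have h1 : i + 1 < a.length := by omega
    have := h i h1
    rw [List.getD_eq_getElem a "" h1, List.getD_eq_getElem a "" (by omega : i < a.length)]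
    simpa using this
  · intro h i hi
    have := h i (by omega)
    rw [List.getD_eq_getElem a "" hi, List.getD_eq_getElem a "" (by omega : i < a.length)]
      at this
    simpa using this

-- lex order between two strings sharing a prefix lower bound: s ≤ u ≤ t, s prefix of t ⇒ s prefix of u
lemma lex_prefix_between (s : List Char) : ∀ u t : List Char,
    (List.Lex (· < ·) s u ∨ s = u) → (List.Lex (· < ·) u t ∨ u = t) → s <+: t → s <+: u := by
  induction s with
  | nil => intro u t _ _ _; exact List.nil_prefix
  | cons c s' ih =>
    intro u t hsu hut hst
    rcases hut with hut | rfl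
    · rcases hsu with hsu | rfl
      · obtain ⟨r, rfl⟩ := hst
        cases hsu with
        | rel hcd =>
          cases hut with
          | rel hbc => exact absurd (hcd.trans hbc) (lt_irrefl _)
          | cons _ => exact absurd hcd (lt_irrefl _)
        | cons hs'u' =>
          cases hut with
          | rel hcc => exact absurd hcc (lt_irrefl _)
          | cons hu't' =>
            exact List.cons_prefix_cons.mpr
              ⟨rfl, ih _ _ (Or.inl hs'u') (Or.inl hu't') ⟨r, rfl⟩⟩
      · exact List.prefix_refl _
    · exact hst

-- lifted to Python's startswith on strings
lemma startswith_of_between (s u t : String) (h1 : s ≤ u) (h2 : u ≤ t)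
    (h : PySem.Str.startswith t s = true) : PySem.Str.startswith u s = true := by
  rw [PySem.Str.startswith_eq, PySem.Chars.startswith_iff] at h ⊢
  refine lex_prefix_between s.toList u.toList t.toList ?_ ?_ h
  · rcases lt_or_eq_of_le (String.le_iff_toList_le.mp h1) with hlt | he
    · exact Or.inl ((List.lt_iff_lex_lt _ _).mp hlt)
    · exact Or.inr he
  · rcases lt_or_eq_of_le (String.le_iff_toList_le.mp h2) with hlt | he
    · exact Or.inl ((List.lt_iff_lex_lt _ _).mp hlt)
    · exact Or.inr he

-- in the sorted list, a (k, 2k+1) prefix pair yields the adjacent pair (k, k+1)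
lemma skip_to_adj (pb : List String) :
    hasSkipPair (PySem.List.sorted pb (fun x => x) false) = true →
    hasAdjPair (PySem.List.sorted pb (fun x => x) false) = true := by
  unfold hasSkipPair hasAdjPair
  simp only [List.any_eq_true, List.mem_range]
  rintro ⟨k, hk, hsw⟩
  have h2 : 2 * k + 1 < (PySem.List.sorted pb (fun x => x) false).length := by omega
  have hk1 : k + 1 < (PySem.List.sorted pb (fun x => x) false).length := by omega
  have hka : k < (PySem.List.sorted pb (fun x => x) false).length := by omega
  refine ⟨k, by omega, ?_⟩
  rw [List.getD_eq_getElem _ "" h2, List.getD_eq_getElem _ "" hka] at hsw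
  rw [List.getD_eq_getElem _ "" hk1, List.getD_eq_getElem _ "" hka]
  exact startswith_of_between _ _ _
    (PySem.List.sorted_id_getElem_mono pb (by omega) hk1)
    (PySem.List.sorted_id_getElem_mono pb (by omega) h2) hsw

-- ===== VERDICT (by name: the statements are the Claim_ definitions above) =====
theorem solution_spec : Claim_unchanged_solution := by
  intro pb _ hnD
  rw [solution_eq_not_skip pb, alt_eq_not_adj pb]
  rw [D_iff pb] at hnD
  cases hskip : hasSkipPair (PySem.List.sorted pb (fun x => x) false) with
  | true => rw [skip_to_adj pb hskip]
  | false =>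
    cases hadj : hasAdjPair (PySem.List.sorted pb (fun x => x) false) with
    | true => exact absurd ⟨hadj, hskip⟩ hnD
    | false => rfl

theorem solution_changed : Claim_changed_solution := by
  unfold Claim_changed_solution
  have hsort : PySem.List.sorted ["a", "b", "bb"] (fun x => x) false = ["a", "b", "bb"] := by
    refine PySem.List.sorted_id_eq_of_perm_of_pairwise _ _ (List.Perm.refl _) ?_
    refine List.Pairwise.cons ?_ (List.Pairwise.cons ?_ (List.pairwise_singleton _ _))
    · intro b hb
      simp only [List.mem_cons, List.not_mem_nil, or_false] at hb
      rcases hb with rfl | rfl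
      · exact String.le_iff_toList_le.mpr (by decide)
      · exact String.le_iff_toList_le.mpr (by decide)
    · intro b hb
      simp only [List.mem_cons, List.not_mem_nil, or_false] at hb
      subst hb
      exact String.le_iff_toList_le.mpr (by decide)
  refine ⟨by decide, (D_iff _).mpr ⟨?_, ?_⟩, ?_, ?_, by decide⟩
  · show hasAdjPair (PySem.List.sorted ["a", "b", "bb"] (fun x => x) false) = true
    rw [hsort]; decide
  · show hasSkipPair (PySem.List.sorted ["a", "b", "bb"] (fun x => x) false) = false
    rw [hsort]; decide
  · show solutionLoopA (PySem.List.sorted ["a", "b", "bb"] (fun x => x) false) 1 = true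
    rw [hsort]; decide
  · show solution_alt ["a", "b", "bb"] = false
    simp only [solution_alt, hsort]
    decide

theorem solution_tight : Claim_exact_solution := by
  intro pb _ hD
  obtain ⟨hadj, hskip⟩ := (D_iff pb).mp hD
  rw [solution_eq_not_skip pb, alt_eq_not_adj pb, hadj, hskip]
  decide
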